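-- pv_equiv track=rewrite | github.com/ku-cms/TrackerDAQ | python/BERT_Analyze.py | findMin_v2
-- ===== SOURCE A (Python) =====
-- def findMin_v2(x_values, y_values):
--     # search data starting with the last point
--     # iterate over list backwards
--     result = -1
--     search = True
--     n = len(x_values)
--     i = n - 1
--     while search:
--         if i < 0:
--             break
--         if y_values[i] > 0:
--             if i < n - 1:
--                 # found min TAP0
--                 result = x_values[i + 1]
--                 search = False
--             else:
--                 # did not find min TAP0
--                 result = -1
--                 search = False
--         i -= 1
--     return result
-- ===== SOURCE B (Python) =====
-- def findMin_v2(x_values, y_values):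
--     # forward scan keeping the last index with positive y, then one final check
--     n = len(x_values)
--     last = -1
--     for i in range(n):
--         if y_values[i] > 0:
--             last = i
--     if last == -1 or last == n - 1:
--         return -1
--     return x_values[last + 1]
-- ===== Notes on version B (the rewrite author's own statement) =====
-- stated objective: simpler
-- what changed: Replaced the backward while-loop with break/search flags by a single forward for-loop that keeps the last positive-y index, followed by one final boundary check.
import Mathlib
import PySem

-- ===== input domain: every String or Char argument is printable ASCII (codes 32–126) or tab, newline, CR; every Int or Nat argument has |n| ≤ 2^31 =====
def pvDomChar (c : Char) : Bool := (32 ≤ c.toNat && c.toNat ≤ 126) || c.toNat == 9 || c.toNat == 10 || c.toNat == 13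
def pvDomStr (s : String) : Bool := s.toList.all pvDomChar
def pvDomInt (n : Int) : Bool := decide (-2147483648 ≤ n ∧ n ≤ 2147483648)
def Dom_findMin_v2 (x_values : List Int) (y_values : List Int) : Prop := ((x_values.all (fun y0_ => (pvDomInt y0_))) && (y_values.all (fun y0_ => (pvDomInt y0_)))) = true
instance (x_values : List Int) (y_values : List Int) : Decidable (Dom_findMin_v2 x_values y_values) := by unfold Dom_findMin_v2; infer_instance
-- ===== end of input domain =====

-- B replaces the backward flag-driven while-loop by one forward scan keeping the last
-- positive-y index plus a final boundary check (objective: simpler).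

-- ===== PORT A =====
-- backward while-loop of A; the `none` branch is where Python raises IndexError (outside Pre_)
def findMinGoA (x_values y_values : List Int) (n : Int) (i : Int) : Int :=
  if h : i < 0 then -1
  else
    match PySem.List.pyGet? y_values i with
    | none => -1   -- Python raises IndexError here; excluded by Pre_
    | some yi =>
      if yi > 0 then
        if i < n - 1 then
          match PySem.List.pyGet? x_values (i + 1) with
          | none => -1   -- unreachable: i+1 < n = len x
          | some xv => xv
        else -1
      else findMinGoA x_values y_values n (i - 1)
termination_by (i + 1).toNat
decreasing_by omega

def findMin_v2 (x_values : List Int) (y_values : List Int) : Int :=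
  findMinGoA x_values y_values x_values.length (x_values.length - 1)

-- ===== PORT B =====
def findMin_v2_alt (x_values : List Int) (y_values : List Int) : Int :=
  let n : Int := x_values.length
  let last : Int :=
    (PySem.List.pyRange 0 n 1).foldl
      (fun last i =>
        match PySem.List.pyGet? y_values i with
        | none => last   -- Python raises IndexError here; excluded by Pre_
        | some yi => if yi > 0 then i else last)
      (-1)
  if last = -1 ∨ last = n - 1 then -1
  else
    match PySem.List.pyGet? x_values (last + 1) with
    | none => -1   -- unreachable: 0 ≤ last+1 < n
    | some xv => xv

-- ===== PRECONDITION & SPEC =====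
-- Pre_ excludes exactly the inputs where Python A raises IndexError:
-- len(y_values) < len(x_values) with x_values nonempty (y_values[n-1] is read first).
def Pre_findMin_v2 (x_values : List Int) (y_values : List Int) : Prop :=
  x_values = [] ∨ x_values.length ≤ y_values.length
instance (x_values : List Int) (y_values : List Int) : Decidable (Pre_findMin_v2 x_values y_values) := by unfold Pre_findMin_v2; infer_instance

def pvWitness_findMin_v2 : List Int × List Int := ([5, 7, 9], [0, 1, 0])

def Spec_findMin_v2 (x_values : List Int) (y_values : List Int) (out : Int) : Prop := out = findMin_v2_alt x_values y_values
instance (x_values : List Int) (y_values : List Int) (out : Int) : Decidable (Spec_findMin_v2 x_values y_values out) := by unfold Spec_findMin_v2; infer_instance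

-- ===== CLAIM (what is proved, stated in full; the proofs are below) =====
def Claim_equal_findMin_v2 : Prop := ∀ (x_values : List Int) (y_values : List Int), Dom_findMin_v2 x_values y_values → Pre_findMin_v2 x_values y_values → Spec_findMin_v2 x_values y_values (findMin_v2 x_values y_values)

-- ===== LEMMAS AND PROOFS =====

-- greatest index j ≤ i with y[j] > 0, as an Int (-1 if none) — reference value
def lastPos (y_values : List Int) : Nat → Int
  | 0 => if y_values.getD 0 0 > 0 then 0 else -1
  | (i+1) => if y_values.getD (i+1) 0 > 0 then ((i : Int) + 1) else lastPos y_values i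

-- the final check both programs perform on the chosen index
def checkIdx (x_values : List Int) (n m : Int) : Int :=
  if m = -1 ∨ m = n - 1 then -1
  else
    match PySem.List.pyGet? x_values (m + 1) with
    | none => -1
    | some xv => xv

lemma getElem?_eq_some_getD (y : List Int) (k : Nat) (h : k < y.length) :
    y[k]? = some (y.getD k 0) := by
  simp [List.getD_eq_getElem?_getD, List.getElem?_eq_getElem h]

lemma goA_eq_check (x y : List Int) (i : Nat)
    (hi : i < x.length) (hy : x.length ≤ y.length) :
    findMinGoA x y x.length (i : Int) = checkIdx x x.length (lastPos y i) := by
  induction i with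
  | zero =>
    have hget : PySem.List.pyGet? y ((0 : Nat) : Int) = some (y.getD 0 0) := by
      rw [PySem.List.pyGet?_natCast]
      exact getElem?_eq_some_getD y 0 (by omega)
    unfold findMinGoA
    simp only [Nat.cast_zero] at hget ⊢
    rw [dif_neg (by omega : ¬ (0 : Int) < 0), hget]
    simp only [lastPos]
    by_cases hpos : y.getD 0 0 > 0
    · simp only [hpos, if_true]
      by_cases hb : (0 : Int) = (x.length : Int) - 1
      · rw [if_neg (by omega : ¬ (0:Int) < (x.length:Int) - 1)]
        simp [checkIdx, hb]
      · rw [if_pos (by omega : (0:Int) < (x.length:Int) - 1)]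
        simp only [checkIdx]
        rw [if_neg (by omega : ¬ ((0:Int) = -1 ∨ (0:Int) = (x.length:Int) - 1))]
    · simp only [hpos, if_false]
      unfold findMinGoA
      rw [dif_pos (by omega : (0:Int) - 1 < 0)]
      simp [checkIdx]
  | succ k ih =>
    have hky : k + 1 < y.length := by omega
    have hget : PySem.List.pyGet? y ((k + 1 : Nat) : Int) = some (y.getD (k+1) 0) := by
      rw [PySem.List.pyGet?_natCast]
      exact getElem?_eq_some_getD y (k+1) hky
    unfold findMinGoA
    rw [dif_neg (by omega : ¬ ((k + 1 : Nat) : Int) < 0), hget]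
    simp only [lastPos]
    by_cases hpos : y.getD (k+1) 0 > 0
    · simp only [hpos, if_true]
      by_cases hb : ((k + 1 : Nat) : Int) = (x.length : Int) - 1
      · rw [if_neg (by omega : ¬ ((k + 1 : Nat) : Int) < (x.length:Int) - 1)]
        simp only [checkIdx]
        rw [if_pos (Or.inr (by push_cast at hb ⊢; omega))]
      · have hk1 : ((k + 1 : Nat) : Int) < (x.length : Int) - 1 := by
          push_cast at hb ⊢; omega
        rw [if_pos hk1]
        simp only [checkIdx]
        rw [if_neg (by push_cast at hb ⊢; omega : ¬ (((k:Int) + 1) = -1 ∨ ((k:Int) + 1) = (x.length:Int) - 1))]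
        push_cast
        rfl
    · simp only [hpos, if_false]
      have hstep : ((k + 1 : Nat) : Int) - 1 = ((k : Nat) : Int) := by push_cast; omega
      rw [hstep]
      exact ih (by omega)

-- the loop body of B, named so the fold lemma and the port share it syntactically
lemma fold_eq_lastPos (y : List Int) (i : Nat) (hy : i ≤ y.length) :
    (PySem.List.pyRange 0 (i : Int) 1).foldl
      (fun last j =>
        match PySem.List.pyGet? y j with
        | none => last
        | some yj => if yj > 0 then j else last)
      (-1)
    = if i = 0 then -1 else lastPos y (i - 1) := by
  induction i with
  | zero => simp [PySem.List.pyRange]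
  | succ k ih =>
    have hsplit : PySem.List.pyRange 0 ((k + 1 : Nat) : Int) 1
        = PySem.List.pyRange 0 (k : Int) 1 ++ [(k : Int)] := by
      have h := PySem.List.pyRange_one_succ_right (a := 0) (b := (k : Int)) (by positivity)
      rw [show ((k + 1 : Nat) : Int) = (k : Int) + 1 by push_cast; ring]
      exact h
    rw [hsplit, List.foldl_append, ih (by omega)]
    have hget : PySem.List.pyGet? y ((k : Nat) : Int) = some (y.getD k 0) := by
      rw [PySem.List.pyGet?_natCast]
      exact getElem?_eq_some_getD y k (by omega)
    simp only [List.foldl_cons, List.foldl_nil, hget]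
    cases k with
    | zero => simp [lastPos]
    | succ m =>
      simp only [Nat.succ_ne_zero, if_false, Nat.add_sub_cancel]
      show (if y.getD (m+1) 0 > 0 then ((m + 1 : Nat) : Int) else lastPos y m) = lastPos y (m+1)
      simp only [lastPos]
      by_cases hpos : y.getD (m+1) 0 > 0
      · simp only [hpos, if_true]; push_cast; ring
      · simp only [hpos, if_false]

lemma alt_eq_check (x y : List Int) :
    findMin_v2_alt x y
      = checkIdx x x.length
          ((PySem.List.pyRange 0 (x.length : Int) 1).foldl
            (fun last j =>
              match PySem.List.pyGet? y j with
              | none => last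
              | some yj => if yj > 0 then j else last)
            (-1)) := rfl

-- ===== VERDICT (by name: the statement is the Claim_ definition above) =====
theorem findMin_v2_spec : Claim_equal_findMin_v2 := by
  intro x y _hdom hpre
  unfold Spec_findMin_v2 findMin_v2
  rw [alt_eq_check]
  have hy : x.length ≤ y.length := by
    rcases hpre with hx | h
    · simp [hx]
    · exact h
  rw [fold_eq_lastPos y x.length hy]
  cases hxe : x.length with
  | zero =>
    simp only [if_true, Nat.cast_zero]
    unfold findMinGoA
    rw [dif_pos (by omega : (0:Int) - 1 < 0)]
    simp [checkIdx]
  | succ m =>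
    have h1 : ((m + 1 : Nat) : Int) - 1 = ((m : Nat) : Int) := by push_cast; ring
    rw [h1, ← hxe, goA_eq_check x y m (by omega) hy,
        if_neg (by omega : ¬ x.length = 0), show x.length - 1 = m by omega]
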